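-- pv_equiv track=rewrite | github.com/ntnprdhmm/advent_of_code_2021 | 8/part_2.py | check_if_using_only_one_value_of_each_sets
-- ===== SOURCE A (Python) =====
-- def check_if_using_only_one_value_of_each_sets(candidate, sets):
--     for s in sets:
--         count = 0
--         for c in candidate:
--             if c in s:
--                 count += 1
--         if count != 1:
--             return False
--
--     return True
-- ===== SOURCE B (Python) =====
-- def check_if_using_only_one_value_of_each_sets(candidate, sets):
--     freq = {}
--     for c in candidate:
--         freq[c] = freq.get(c, 0) + 1
--     return all(sum(freq.get(x, 0) for x in set(s)) == 1 for s in sets)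
-- ===== Notes on version B (the rewrite author's own statement) =====
-- stated objective: alternative
-- what changed: B builds a character-frequency dictionary of the candidate in one pass, then judges each set by summing the frequencies of its distinct elements, instead of A's per-set rescan of the whole candidate with an early return.
import Mathlib
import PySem

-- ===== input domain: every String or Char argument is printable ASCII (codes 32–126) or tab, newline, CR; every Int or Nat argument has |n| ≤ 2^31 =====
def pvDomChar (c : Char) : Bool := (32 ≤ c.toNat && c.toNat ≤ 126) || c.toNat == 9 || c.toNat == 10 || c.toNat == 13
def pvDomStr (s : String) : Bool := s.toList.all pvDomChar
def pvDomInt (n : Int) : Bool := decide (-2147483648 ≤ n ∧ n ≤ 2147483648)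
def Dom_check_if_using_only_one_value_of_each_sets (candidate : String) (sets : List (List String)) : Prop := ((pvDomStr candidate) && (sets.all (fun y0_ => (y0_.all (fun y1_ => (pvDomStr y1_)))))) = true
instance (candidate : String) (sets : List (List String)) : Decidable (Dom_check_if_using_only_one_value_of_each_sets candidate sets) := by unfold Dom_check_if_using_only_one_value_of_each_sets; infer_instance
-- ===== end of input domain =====

-- B replaces A's per-set rescan of the candidate by one frequency dictionary of the candidate
-- plus a sum over each set's distinct elements (objective: alternative algorithm, same measured cost).

-- ===== PORT A =====
-- inner loop of A: count = 0; for c in candidate: if c in s: count += 1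
def pvCountA (cs : List Char) (s : List String) : Int :=
  cs.foldl (fun count c => if s.contains c.toString then count + 1 else count) 0

-- outer loop of A with early return False
def pvLoopA (cs : List Char) : List (List String) → Bool
  | [] => true
  | s :: rest => if pvCountA cs s ≠ 1 then false else pvLoopA cs rest

def check_if_using_only_one_value_of_each_sets (candidate : String) (sets : List (List String)) : Bool :=
  pvLoopA candidate.toList sets

-- ===== PORT B =====
-- freq = {}; for c in candidate: freq[c] = freq.get(c, 0) + 1
def pvFreqB (cs : List Char) : PySem.Dict String Int :=
  cs.foldl (fun d c => d.insert c.toString (d.getD c.toString 0 + 1)) PySem.Dict.empty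

-- sum(freq.get(x, 0) for x in set(s))
def pvSumB (freq : PySem.Dict String Int) (s : List String) : Int :=
  (PySem.Set.ofList s).foldl (fun acc x => acc + freq.getD x 0) 0

def check_if_using_only_one_value_of_each_sets_alt (candidate : String) (sets : List (List String)) : Bool :=
  let freq := pvFreqB candidate.toList
  sets.all (fun s => pvSumB freq s == 1)

-- ===== PRECONDITION & SPEC =====
def Spec_check_if_using_only_one_value_of_each_sets (candidate : String) (sets : List (List String)) (out : Bool) : Prop := out = check_if_using_only_one_value_of_each_sets_alt candidate sets
instance (candidate : String) (sets : List (List String)) (out : Bool) : Decidable (Spec_check_if_using_only_one_value_of_each_sets candidate sets out) := by unfold Spec_check_if_using_only_one_value_of_each_sets; infer_instance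

-- ===== CLAIM (what is proved, stated in full; the proofs are below) =====
def Claim_equal_check_if_using_only_one_value_of_each_sets : Prop := ∀ (candidate : String) (sets : List (List String)), Dom_check_if_using_only_one_value_of_each_sets candidate sets → Spec_check_if_using_only_one_value_of_each_sets candidate sets (check_if_using_only_one_value_of_each_sets candidate sets)

-- ===== LEMMAS AND PROOFS =====
-- the frequency dict looks up the count of x among the candidate's chars (as 1-char strings)
theorem pv_freq_getD (cs : List Char) (x : String) :
    (pvFreqB cs).getD x 0 = ((cs.map (fun c => c.toString)).count x : Int) := by
  unfold pvFreqB
  rw [← List.foldl_map (f := fun c : Char => c.toString)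
        (g := fun d t => PySem.Dict.insert d t (PySem.Dict.getD d t 0 + 1))]
  rw [PySem.Dict.getD_foldl_insert_add_one]
  simp

-- folding +f over a list with a start value
theorem pv_foldl_add_eq_sum {α : Type} (f : α → Int) :
    ∀ (S : List α) (i : Int), S.foldl (fun acc x => acc + f x) i = i + (S.map f).sum
  | [], i => by simp
  | x :: S, i => by
      simp [pv_foldl_add_eq_sum f S (i + f x)]; ring

-- A's inner count is a filter length over the chars-as-strings
theorem pv_indicator_sum (P : String → Bool) :
    ∀ ms : List String, (ms.map (fun t => if P t then (1 : Int) else 0)).sum = ((ms.filter P).length : Int)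
  | [] => by simp
  | m :: ms => by by_cases h : P m <;> simp [h, pv_indicator_sum P ms]; ring

-- A's inner count is a filter length over the chars-as-strings
theorem pv_countA_filter (cs : List Char) (s : List String) :
    pvCountA cs s = (((cs.map (fun c => c.toString)).filter (fun t => s.contains t)).length : Int) := by
  unfold pvCountA
  rw [← List.foldl_map (f := fun c : Char => c.toString)
        (g := fun (count : Int) t => if s.contains t then count + 1 else count)]
  have hfun : (fun (count : Int) t => if s.contains t then count + 1 else count)
      = (fun (count : Int) t => count + if s.contains t then (1 : Int) else 0) := by
    funext count t; by_cases h : t ∈ s <;> simp [h]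
  rw [hfun, pv_foldl_add_eq_sum, pv_indicator_sum, zero_add]

-- summing counts over a duplicate-free list of keys is counting membership
theorem pv_sum_counts (S : List String) (hS : S.Nodup) (ms : List String) :
    (S.map (fun x => (ms.count x : Int))).sum
      = ((ms.filter (fun t => S.contains t)).length : Int) := by
  induction ms with
  | nil => simp
  | cons m ms ih =>
      have hsum : (S.map (fun x => ((m :: ms).count x : Int))).sum
          = (S.map (fun x => (ms.count x : Int))).sum
            + (S.map (fun x => if m = x then (1 : Int) else 0)).sum := by
        rw [← List.sum_map_add]
        refine congrArg List.sum (List.map_congr_left ?_)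
        intro x _
        by_cases h : m = x <;> simp [h]
      have hone : (S.map (fun x => if m = x then (1 : Int) else 0)).sum
          = if m ∈ S then (1 : Int) else 0 := by
        clear hsum ih
        induction S with
        | nil => simp
        | cons y S ihS =>
            have hy : y ∉ S := (List.nodup_cons.mp hS).1
            have := ihS (List.nodup_cons.mp hS).2
            by_cases h : m = y
            · subst h
              simp [this, hy]
            · simp [h, this]
      by_cases hm : m ∈ S <;>
        simp [hsum, hone, hm, ih]

-- per set: B's dictionary sum equals A's inner count
theorem pv_sum_eq_countA (cs : List Char) (s : List String) :
    pvSumB (pvFreqB cs) s = pvCountA cs s := by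
  unfold pvSumB
  rw [pv_foldl_add_eq_sum, pv_countA_filter]
  have h1 : ((PySem.Set.ofList s).map (fun x => (pvFreqB cs).getD x 0)).sum
      = ((PySem.Set.ofList s).map (fun x => ((cs.map (fun c => c.toString)).count x : Int))).sum := by
    refine congrArg List.sum (List.map_congr_left ?_)
    intro x _; exact pv_freq_getD cs x
  rw [zero_add, h1,
      pv_sum_counts (PySem.Set.ofList s) (PySem.Set.nodup_ofList s) (cs.map (fun c => c.toString))]
  simp [PySem.Set.mem_ofList]

-- A's early-return loop is the all-check
theorem pv_loopA_all (cs : List Char) :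
    ∀ (sets : List (List String)),
      pvLoopA cs sets = sets.all (fun s => pvCountA cs s == 1)
  | [] => rfl
  | s :: rest => by
      by_cases h : pvCountA cs s = 1 <;>
        simp [pvLoopA, h, pv_loopA_all cs rest]

-- ===== VERDICT (by name: the statement is the Claim_ definition above) =====
theorem check_if_using_only_one_value_of_each_sets_spec : Claim_equal_check_if_using_only_one_value_of_each_sets := by
  intro candidate sets _
  unfold Spec_check_if_using_only_one_value_of_each_sets
  unfold check_if_using_only_one_value_of_each_sets check_if_using_only_one_value_of_each_sets_alt
  rw [pv_loopA_all]
  refine congrArg (List.all sets) ?_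
  funext s
  rw [pv_sum_eq_countA]
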